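-- pv_equiv track=rewrite | github.com/theshadowable/iws-sh | backend/chatbot_service.py | _analyze_for_actions
-- ===== SOURCE A (Python) =====
-- from typing import Dict, List, Optional
--
-- def _analyze_for_actions(user_message: str, ai_response: str) -> List[Dict]:
--     """
--     Analyze conversation to suggest quick actions
--
--     Args:
--         user_message: User's original message
--         ai_response: AI's response
--
--     Returns:
--         List of suggested actions
--     """
--     actions = []
--
--     # Convert to lowercase for analysis
--     msg_lower = user_message.lower()
--     resp_lower = ai_response.lower()
--
--     # Suggest top-up if balance-related
--     if any(word in msg_lower for word in ["balance", "top up", "topup", "isi ulang", "saldo"]):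
--         actions.append({
--             "label": "Top Up Balance",
--             "action": "navigate",
--             "url": "/balance-purchase"
--         })
--
--     # Suggest analytics if usage-related
--     if any(word in msg_lower for word in ["usage", "consumption", "penggunaan", "pemakaian"]):
--         actions.append({
--             "label": "View Usage Analytics",
--             "action": "navigate",
--             "url": "/analytics"
--         })
--
--     # Suggest payment history if transaction-related
--     if any(word in msg_lower for word in ["payment", "transaction", "history", "pembayaran", "transaksi"]):
--         actions.append({
--             "label": "View Payment History",
--             "action": "navigate",
--             "url": "/purchase-history"
--         })
--
--     # Suggest creating ticket for technical/problem keywords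
--     if any(word in msg_lower for word in ["problem", "issue", "not working", "broken", "error", "masalah", "rusak"]):
--         actions.append({
--             "label": "Create Support Ticket",
--             "action": "create_ticket"
--         })
--
--     return actions
-- ===== SOURCE B (Python) =====
-- # B: single-sweep multi-pattern scan. Instead of testing each keyword group with
-- # substring search, walk the lowercased message once position by position and mark
-- # which rule each keyword that starts there belongs to; then emit the actions of
-- # the marked rules in rule order. ai_response is unused (A lowercases it to no effect).
--
-- KEYWORDS = [
--     ("balance", 0), ("top up", 0), ("topup", 0), ("isi ulang", 0), ("saldo", 0),
--     ("usage", 1), ("consumption", 1), ("penggunaan", 1), ("pemakaian", 1),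
--     ("payment", 2), ("transaction", 2), ("history", 2), ("pembayaran", 2), ("transaksi", 2),
--     ("problem", 3), ("issue", 3), ("not working", 3), ("broken", 3), ("error", 3),
--     ("masalah", 3), ("rusak", 3),
-- ]
--
-- ACTIONS = [
--     {"label": "Top Up Balance", "action": "navigate", "url": "/balance-purchase"},
--     {"label": "View Usage Analytics", "action": "navigate", "url": "/analytics"},
--     {"label": "View Payment History", "action": "navigate", "url": "/purchase-history"},
--     {"label": "Create Support Ticket", "action": "create_ticket"},
-- ]
--
-- def _match_rules(m):
--     hits = set()
--     for i in range(len(m) + 1):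
--         for kw, j in KEYWORDS:
--             if m.startswith(kw, i):
--                 hits.add(j)
--     return hits
--
-- def _analyze_for_actions(user_message, ai_response):
--     m = user_message.lower()
--     hits = _match_rules(m)
--     return [act for j, act in enumerate(ACTIONS) if j in hits]
-- ===== Notes on version B (the rewrite author's own statement) =====
-- stated objective: alternative
-- what changed: Replaces the four per-group any(substring in msg) checks by a single position-by-position sweep of the lowercased message that marks the rule of every keyword starting at each position (a flat keyword->rule index table plus a hit set), then emits the actions of the marked rules in rule order; the unused ai_response.lower() is dropped.
import Mathlib
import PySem

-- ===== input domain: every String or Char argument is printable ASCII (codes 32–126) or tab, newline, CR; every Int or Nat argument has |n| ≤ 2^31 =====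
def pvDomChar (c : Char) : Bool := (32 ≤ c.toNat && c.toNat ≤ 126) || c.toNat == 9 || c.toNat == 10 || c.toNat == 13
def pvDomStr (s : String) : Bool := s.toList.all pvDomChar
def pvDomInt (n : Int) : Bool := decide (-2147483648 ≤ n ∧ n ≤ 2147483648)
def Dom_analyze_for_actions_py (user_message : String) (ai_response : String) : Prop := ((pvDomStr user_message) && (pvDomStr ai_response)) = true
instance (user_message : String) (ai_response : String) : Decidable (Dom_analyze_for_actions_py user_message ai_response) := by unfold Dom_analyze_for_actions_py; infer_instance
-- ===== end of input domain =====

-- B replaces A's four per-group substring checks by a single position-by-position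
-- sweep of the lowercased message over a flat keyword->rule table, collecting a hit
-- set of rule indices (objective: alternative; ai_response is unused in both).

-- ===== PORT A =====
-- literal transliteration of A: lowercase both strings, four sequential
-- `if any(word in msg_lower for word in [...]): actions.append({...})` branches.
def analyze_for_actions_py (user_message : String) (ai_response : String) : List (List (String × String)) :=
  let actions : List (List (String × String)) := []
  let msg_lower := PySem.Str.lower user_message
  let _resp_lower := PySem.Str.lower ai_response
  let actions :=
    if ["balance", "top up", "topup", "isi ulang", "saldo"].any
        (fun word => PySem.Str.isIn word msg_lower) then
      actions ++ [[("label", "Top Up Balance"), ("action", "navigate"), ("url", "/balance-purchase")]]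
    else actions
  let actions :=
    if ["usage", "consumption", "penggunaan", "pemakaian"].any
        (fun word => PySem.Str.isIn word msg_lower) then
      actions ++ [[("label", "View Usage Analytics"), ("action", "navigate"), ("url", "/analytics")]]
    else actions
  let actions :=
    if ["payment", "transaction", "history", "pembayaran", "transaksi"].any
        (fun word => PySem.Str.isIn word msg_lower) then
      actions ++ [[("label", "View Payment History"), ("action", "navigate"), ("url", "/purchase-history")]]
    else actions
  let actions :=
    if ["problem", "issue", "not working", "broken", "error", "masalah", "rusak"].any
        (fun word => PySem.Str.isIn word msg_lower) then
      actions ++ [[("label", "Create Support Ticket"), ("action", "create_ticket")]]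
    else actions
  actions

-- ===== PORT B =====
-- B's flat keyword -> rule-index table (Python KEYWORDS), keywords as char lists.
def pvKeywords : List (List Char × Int) :=
  [ ("balance".toList, 0), ("top up".toList, 0), ("topup".toList, 0), ("isi ulang".toList, 0), ("saldo".toList, 0),
    ("usage".toList, 1), ("consumption".toList, 1), ("penggunaan".toList, 1), ("pemakaian".toList, 1),
    ("payment".toList, 2), ("transaction".toList, 2), ("history".toList, 2), ("pembayaran".toList, 2), ("transaksi".toList, 2),
    ("problem".toList, 3), ("issue".toList, 3), ("not working".toList, 3), ("broken".toList, 3), ("error".toList, 3),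
    ("masalah".toList, 3), ("rusak".toList, 3) ]

-- B's rule-indexed action dicts (Python ACTIONS).
def pvActions : List (List (String × String)) :=
  [ [("label", "Top Up Balance"), ("action", "navigate"), ("url", "/balance-purchase")],
    [("label", "View Usage Analytics"), ("action", "navigate"), ("url", "/analytics")],
    [("label", "View Payment History"), ("action", "navigate"), ("url", "/purchase-history")],
    [("label", "Create Support Ticket"), ("action", "create_ticket")] ]

-- Python helper _match_rules: sweep every position i of m; m.startswith(kw, i)
-- (0 ≤ i) is ported exactly as the prefix test on m.drop i.
def pvMatchRules (m : List Char) : PySem.Set Int :=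
  (PySem.List.pyRange 0 ((m.length : Int) + 1) 1).foldl
    (fun hits i =>
      pvKeywords.foldl
        (fun hits kj =>
          if PySem.Chars.startswith (m.drop i.toNat) kj.1 then PySem.Set.add hits kj.2 else hits)
        hits)
    PySem.Set.empty

-- literal transliteration of B: lowercase, sweep, then the enumerate-filter comprehension.
def analyze_for_actions_py_alt (user_message : String) (ai_response : String) : List (List (String × String)) :=
  let m := PySem.Chars.lower user_message.toList
  let hits := pvMatchRules m
  ((PySem.List.enumerate pvActions 0).filter (fun p => PySem.Set.contains hits p.1)).map (·.2)

-- ===== PRECONDITION & SPEC =====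
def Spec_analyze_for_actions_py (user_message : String) (ai_response : String) (out : List (List (String × String))) : Prop := out = analyze_for_actions_py_alt user_message ai_response
instance (user_message : String) (ai_response : String) (out : List (List (String × String))) : Decidable (Spec_analyze_for_actions_py user_message ai_response out) := by unfold Spec_analyze_for_actions_py; infer_instance

-- ===== CLAIM (what is proved, stated in full; the proofs are below) =====
def Claim_equal_analyze_for_actions_py : Prop := ∀ (user_message : String) (ai_response : String), Dom_analyze_for_actions_py user_message ai_response → Spec_analyze_for_actions_py user_message ai_response (analyze_for_actions_py user_message ai_response)

-- ===== LEMMAS AND PROOFS =====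

-- membership after the inner fold over the keyword table
lemma pv_mem_inner (s : List Char) (ks : List (List Char × Int)) (h : PySem.Set Int) (j : Int) :
    j ∈ ks.foldl
        (fun hits kj => if PySem.Chars.startswith s kj.1 then PySem.Set.add hits kj.2 else hits) h ↔
      j ∈ h ∨ ∃ kj ∈ ks, kj.2 = j ∧ PySem.Chars.startswith s kj.1 = true := by
  induction ks generalizing h with
  | nil => simp
  | cons kj ks ih =>
    simp only [List.foldl_cons, List.mem_cons]
    rw [ih]
    by_cases hs : PySem.Chars.startswith s kj.1 = true
    · simp only [hs, if_true, PySem.Set.mem_add, or_and_right, exists_or, exists_eq_left]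
      tauto
    · simp only [hs, or_and_right, exists_or, exists_eq_left]
      tauto

-- membership after the outer fold over the positions
lemma pv_mem_outer (m : List Char) (is : List Int) (h : PySem.Set Int) (j : Int) :
    j ∈ is.foldl
        (fun hits i =>
          pvKeywords.foldl
            (fun hits kj =>
              if PySem.Chars.startswith (m.drop i.toNat) kj.1 then PySem.Set.add hits kj.2 else hits)
            hits) h ↔
      j ∈ h ∨ ∃ i ∈ is, ∃ kj ∈ pvKeywords, kj.2 = j ∧
        PySem.Chars.startswith (m.drop i.toNat) kj.1 = true := by
  induction is generalizing h with
  | nil => simp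
  | cons i is ih =>
    simp only [List.foldl_cons, List.mem_cons]
    rw [ih, pv_mem_inner]
    simp only [or_and_right, exists_or, exists_eq_left]
    rw [or_assoc]

-- the sweep finds exactly the rules one of whose keywords is a substring of m
lemma pv_matchRules_mem (m : List Char) (j : Int) :
    j ∈ pvMatchRules m ↔
      ∃ kj ∈ pvKeywords, kj.2 = j ∧ PySem.Chars.isIn kj.1 m = true := by
  unfold pvMatchRules
  rw [pv_mem_outer]
  simp only [PySem.Set.empty, List.not_mem_nil, false_or]
  constructor
  · rintro ⟨i, _, kj, hmem, hj, hpre⟩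
    exact ⟨kj, hmem, hj, (PySem.Chars.exists_prefix_drop_iff_isIn _ _).1
      ⟨i.toNat, (PySem.Chars.startswith_iff _ _).1 hpre⟩⟩
  · rintro ⟨kj, hmem, hj, hin⟩
    obtain ⟨d, hd⟩ := (PySem.Chars.exists_prefix_drop_iff_isIn _ _).2 hin
    refine ⟨(min d m.length : Nat), ?_, kj, hmem, hj, ?_⟩
    · rw [PySem.List.mem_pyRange_one]
      omega
    · rw [PySem.Chars.startswith_iff]
      have : m.drop ((min d m.length : Nat) : Int).toNat = m.drop d := by
        by_cases hc : d ≤ m.length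
        · simp [Nat.min_eq_left hc]
        · have hdd : m.length ≤ d := by omega
          have h1 : List.drop m.length m = ([] : List Char) := List.drop_of_length_le le_rfl
          have h2 : List.drop d m = ([] : List Char) := List.drop_of_length_le hdd
          simp [Nat.min_eq_right hdd, h1, h2]
      rw [this]; exact hd

-- ===== VERDICT (by name: the statement is the Claim_ definition above) =====
theorem analyze_for_actions_py_spec : Claim_equal_analyze_for_actions_py := by
  intro um ai _
  unfold Spec_analyze_for_actions_py analyze_for_actions_py analyze_for_actions_py_alt
  have hset : ∀ j : Int, PySem.Set.contains (pvMatchRules (PySem.Chars.lower um.toList)) j =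
      decide (∃ kj ∈ pvKeywords, kj.2 = j ∧ PySem.Chars.isIn kj.1 (PySem.Chars.lower um.toList) = true) := by
    intro j
    simp [PySem.Set.contains, pv_matchRules_mem]
  simp only [pvActions, PySem.List.enumerate_cons, PySem.List.enumerate_nil,
    List.filter_cons, List.filter_nil, hset, pvKeywords]
  simp [List.any_cons, List.mem_cons]
  split_ifs <;> simp_all
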